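-- pv_equiv track=rewrite | github.com/mahrens917/common | src/common/redis_protocol/market_normalization_core.py | _resolve_keyword
-- ===== SOURCE A (Python) =====
-- from typing import Any, Dict, List, Mapping, MutableMapping, Optional, Tuple
--
-- def _resolve_keyword(tokens: List[str]) -> Optional[str]:
--     if "BETWEEN" in tokens:
--         return "between"
--     if any(token in {"LESS", "BELOW"} for token in tokens):
--         return "less"
--     if any(token in {"GREATER", "ABOVE"} for token in tokens):
--         return "greater"
--     return None
-- ===== SOURCE B (Python) =====
-- _RANK = {
--     "BETWEEN": (0, "between"),
--     "LESS": (1, "less"),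
--     "BELOW": (1, "less"),
--     "GREATER": (2, "greater"),
--     "ABOVE": (2, "greater"),
-- }
--
--
-- def _resolve_keyword(tokens):
--     best = None
--     for tok in tokens:
--         entry = _RANK.get(tok)
--         if entry is not None and (best is None or entry[0] < best[0]):
--             best = entry
--             if best[0] == 0:
--                 break
--     return best[1] if best is not None else None
-- ===== Notes on version B (the rewrite author's own statement) =====
-- stated objective: alternative
-- what changed: Replaced the three separate membership scans (contains/any/any) by a single pass that looks each token up in a trigger->(rank, keyword) table, keeps the lowest rank seen, breaks on rank 0, and returns the keyword of the best rank (or None).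
import Mathlib
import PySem

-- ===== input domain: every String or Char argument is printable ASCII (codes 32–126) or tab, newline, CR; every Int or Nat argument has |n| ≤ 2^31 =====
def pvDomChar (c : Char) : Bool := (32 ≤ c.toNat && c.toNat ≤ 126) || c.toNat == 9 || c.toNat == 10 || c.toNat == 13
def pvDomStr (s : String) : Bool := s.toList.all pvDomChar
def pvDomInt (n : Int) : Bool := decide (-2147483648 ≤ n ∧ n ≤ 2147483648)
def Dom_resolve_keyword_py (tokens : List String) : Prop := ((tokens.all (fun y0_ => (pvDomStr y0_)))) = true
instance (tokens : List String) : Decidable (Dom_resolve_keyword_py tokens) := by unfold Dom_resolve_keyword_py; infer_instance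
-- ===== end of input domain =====

-- B replaces A's three membership scans by one table-lookup pass keeping the lowest rank seen (alternative decomposition, same cost).


-- ===== PORT A =====
def resolve_keyword_py (tokens : List String) : Option String :=
  if tokens.contains "BETWEEN" then some "between"
  else if tokens.any (fun token => token == "LESS" || token == "BELOW") then some "less"
  else if tokens.any (fun token => token == "GREATER" || token == "ABOVE") then some "greater"
  else none

-- ===== PORT B =====
-- the module-level _RANK dict literal of Source B (keys are distinct)
def pvRankTable : PySem.Dict String (Nat × String) :=
  PySem.Dict.mk
    [("BETWEEN", (0, "between")), ("LESS", (1, "less")), ("BELOW", (1, "less")),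
     ("GREATER", (2, "greater")), ("ABOVE", (2, "greater"))]

-- the for-loop of Source B: accumulator `best`, early break when rank 0 is reached
def pvAltLoop : List String → Option (Nat × String) → Option (Nat × String)
  | [], best => best
  | tok :: rest, best =>
    match PySem.Dict.get? pvRankTable tok with
    | none => pvAltLoop rest best
    | some entry =>
      if (match best with | none => true | some b => entry.1 < b.1) then
        if entry.1 = 0 then some entry else pvAltLoop rest (some entry)
      else pvAltLoop rest best

def resolve_keyword_py_alt (tokens : List String) : Option String :=
  match pvAltLoop tokens none with
  | some best => some best.2
  | none => none

-- ===== PRECONDITION & SPEC =====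
def Spec_resolve_keyword_py (tokens : List String) (out : Option String) : Prop := out = resolve_keyword_py_alt tokens
instance (tokens : List String) (out : Option String) : Decidable (Spec_resolve_keyword_py tokens out) := by unfold Spec_resolve_keyword_py; infer_instance

-- ===== CLAIM (what is proved, stated in full; the proofs are below) =====
def Claim_equal_resolve_keyword_py : Prop := ∀ (tokens : List String), Dom_resolve_keyword_py tokens → Spec_resolve_keyword_py tokens (resolve_keyword_py tokens)

-- ===== LEMMAS AND PROOFS =====

-- rank-annotated summary of A's three scans (proof helper only)
def pvSum (l : List String) : Option (Nat × String) :=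
  if l.contains "BETWEEN" then some (0, "between")
  else if l.any (fun token => token == "LESS" || token == "BELOW") then some (1, "less")
  else if l.any (fun token => token == "GREATER" || token == "ABOVE") then some (2, "greater")
  else none

-- merge a summary into an accumulator, keeping the lower rank (accumulator wins ties)
def pvComb : Option (Nat × String) → Option (Nat × String) → Option (Nat × String)
  | none, best => best
  | some e, none => some e
  | some e, some b => if e.1 < b.1 then some e else some b

theorem pvAltLoop_eq (l : List String) :
    ∀ best, (best = none ∨ best = some (1, "less") ∨ best = some (2, "greater")) →
      pvAltLoop l best = pvComb (pvSum l) best := by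
  induction l with
  | nil =>
    intro best hb
    rcases hb with h | h | h <;> subst h <;> rfl
  | cons t rest ih =>
    intro best hb
    by_cases h1 : t = "BETWEEN"
    · subst h1
      have hg : PySem.Dict.get? pvRankTable "BETWEEN" = some (0, "between") := rfl
      rcases hb with h | h | h <;> subst h <;>
        simp [pvAltLoop, hg, pvSum, pvComb]
    · by_cases h2 : t = "LESS"
      · subst h2
        have hg : PySem.Dict.get? pvRankTable "LESS" = some (1, "less") := rfl
        rcases hb with h | h | h <;> subst h <;>
          simp [pvAltLoop, hg, ih _ (Or.inr (Or.inl rfl)), pvSum, pvComb,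
            List.contains_cons, List.any_cons] <;>
          split_ifs <;> simp [pvComb]
      · by_cases h3 : t = "BELOW"
        · subst h3
          have hg : PySem.Dict.get? pvRankTable "BELOW" = some (1, "less") := rfl
          rcases hb with h | h | h <;> subst h <;>
            simp [pvAltLoop, hg, ih _ (Or.inr (Or.inl rfl)), pvSum, pvComb,
              List.contains_cons, List.any_cons] <;>
            split_ifs <;> simp [pvComb]
        · by_cases h4 : t = "GREATER"
          · subst h4
            have hg : PySem.Dict.get? pvRankTable "GREATER" = some (2, "greater") := rfl
            rcases hb with h | h | h <;> subst h <;>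
              simp [pvAltLoop, hg, ih _ (Or.inr (Or.inl rfl)), ih _ (Or.inr (Or.inr rfl)),
                pvSum, pvComb, List.contains_cons, List.any_cons] <;>
              split_ifs <;> simp [pvComb]
          · by_cases h5 : t = "ABOVE"
            · subst h5
              have hg : PySem.Dict.get? pvRankTable "ABOVE" = some (2, "greater") := rfl
              rcases hb with h | h | h <;> subst h <;>
                simp [pvAltLoop, hg, ih _ (Or.inr (Or.inl rfl)), ih _ (Or.inr (Or.inr rfl)),
                  pvSum, pvComb, List.contains_cons, List.any_cons] <;>
                split_ifs <;> simp [pvComb]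
            · have e1 := Ne.symm h1; have e2 := Ne.symm h2; have e3 := Ne.symm h3
              have e4 := Ne.symm h4; have e5 := Ne.symm h5
              have hg : PySem.Dict.get? pvRankTable t = none := by
                simp [pvRankTable, PySem.Dict.get?_mk_cons, e1, e2, e3, e4, e5,
                  PySem.Dict.get?]
              rcases hb with h | h | h <;> subst h <;>
                simp [pvAltLoop, hg, ih none (Or.inl rfl),
                  ih (some (1, "less")) (Or.inr (Or.inl rfl)),
                  ih (some (2, "greater")) (Or.inr (Or.inr rfl)), pvSum, pvComb,
                  List.any_cons, e1, e2, e3, e4, e5, h2, h3, h4, h5]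

theorem pvA_eq_sum (tokens : List String) :
    resolve_keyword_py tokens = (pvSum tokens).map Prod.snd := by
  simp only [resolve_keyword_py, pvSum]
  split_ifs <;> rfl

-- ===== VERDICT (by name: the statement is the Claim_ definition above) =====
theorem resolve_keyword_py_spec : Claim_equal_resolve_keyword_py := by
  intro tokens _
  show resolve_keyword_py tokens = resolve_keyword_py_alt tokens
  rw [pvA_eq_sum, resolve_keyword_py_alt, pvAltLoop_eq tokens none (Or.inl rfl)]
  cases pvSum tokens <;> simp [pvComb]
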